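-- pv_equiv track=rewrite | github.com/pypi-data/pypi-mirror-282 | packages/Boom2Zoom/boom2zoom-2024.6.29.tar.gz/boom2zoom-2024.6.29/boom2zoom/animation/animdefs.py | join_definitions
-- ===== SOURCE A (Python) =====
-- from collections.abc import Sequence, Iterable
--
-- def join_definitions(definitions: Iterable[str]) -> str:
--     """Neatly combines ANIMDEFS definitions into one string.
--
--     Formatting rules:
--         If a definition is multiline, then it gets a one-line margin above and below. These margins collapse. Single
--         lines do not get margins.
--     """
--
--     staging: list[str] = []
--
--     for string in definitions:
--         blank_behind = staging[-2::] == ["\n", "\n"]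
--         current_is_multiline = "\n" in string
--
--         if current_is_multiline and not blank_behind:
--             staging.append("\n")
--
--         staging.append(string)
--         staging.append("\n")
--
--         if current_is_multiline:
--             staging.append("\n")
--
--     return "".join(staging).strip()
-- ===== SOURCE B (Python) =====
-- def join_definitions(definitions):
--     """Neatly combines ANIMDEFS definitions into one string.
--
--     Pairwise-separator join: between two consecutive definitions goes a blank
--     line iff either of them is multiline, otherwise a single newline; the
--     outer margins are removed by the final strip.
--     """
--     defs = list(definitions)
--     flags = ["\n" in s for s in defs]
--     parts = defs[:1]
--     for (prev_ml, cur_ml), s in zip(zip(flags, flags[1:]), defs[1:]):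
--         parts.append("\n\n" if prev_ml or cur_ml else "\n")
--         parts.append(s)
--     return "".join(parts).strip()
-- ===== Notes on version B (the rewrite author's own statement) =====
-- stated objective: simpler
-- what changed: Replaced A's token-push state machine (appending margin tokens to a staging list and deciding each margin by a lookback slice staging[-2:] == ['\n','\n']) with a pairwise-separator join: precompute each definition's multiline flag once and place between consecutive definitions '\n\n' iff either neighbour is multiline, else '\n', then strip.
import Mathlib
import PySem

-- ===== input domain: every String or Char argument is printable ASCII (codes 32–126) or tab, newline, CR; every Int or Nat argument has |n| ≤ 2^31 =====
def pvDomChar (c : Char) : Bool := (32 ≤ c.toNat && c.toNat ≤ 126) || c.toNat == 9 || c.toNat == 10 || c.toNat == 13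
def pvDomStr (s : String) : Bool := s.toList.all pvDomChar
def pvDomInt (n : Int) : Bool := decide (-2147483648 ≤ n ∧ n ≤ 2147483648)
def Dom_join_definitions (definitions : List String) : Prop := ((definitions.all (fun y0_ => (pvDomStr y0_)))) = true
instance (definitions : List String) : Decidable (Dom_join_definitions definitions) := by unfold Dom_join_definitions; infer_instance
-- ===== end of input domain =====

-- B replaces A's token-push state machine (lookback slice deciding margins) by a
-- pairwise-separator join over precomputed multiline flags; objective: simpler.

-- ===== PORT A =====
-- one iteration of A's loop body, verbatim
def joinA_step (staging : List String) (string : String) : List String :=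
  let blank_behind := PySem.List.slice staging (some (-2)) none == ["\n", "\n"]
  let current_is_multiline := PySem.Str.isIn "\n" string
  let staging := if current_is_multiline && !blank_behind then staging ++ ["\n"] else staging
  let staging := staging ++ [string]
  let staging := staging ++ ["\n"]
  if current_is_multiline then staging ++ ["\n"] else staging

def join_definitions (definitions : List String) : String :=
  PySem.Str.strip (PySem.Str.join "" (definitions.foldl joinA_step []))

-- ===== PORT B =====
-- one iteration of B's loop body: append the separator, then the definition
def joinB_step (parts : List String) (x : (Bool × Bool) × String) : List String :=
  (parts ++ [if x.1.1 || x.1.2 then "\n\n" else "\n"]) ++ [x.2]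

def join_definitions_alt (definitions : List String) : String :=
  let defs := definitions
  let flags := defs.map (fun s => PySem.Str.isIn "\n" s)
  let parts := defs.take 1                  -- defs[:1]
  let parts := (((flags.zip (flags.drop 1)).zip (defs.drop 1)).foldl joinB_step parts)
  PySem.Str.strip (PySem.Str.join "" parts)

-- ===== PRECONDITION & SPEC =====
def Spec_join_definitions (definitions : List String) (out : String) : Prop := out = join_definitions_alt definitions
instance (definitions : List String) (out : String) : Decidable (Spec_join_definitions definitions out) := by unfold Spec_join_definitions; infer_instance

-- ===== CLAIM (what is proved, stated in full; the proofs are below) =====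
def Claim_equal_join_definitions : Prop := ∀ (definitions : List String), Dom_join_definitions definitions → Spec_join_definitions definitions (join_definitions definitions)

-- ===== LEMMAS AND PROOFS =====

-- multiline flag
def mlB (s : String) : Bool := PySem.Str.isIn "\n" s

-- the characters of "".join(parts)
def joinChars (parts : List String) : List Char := (parts.map String.toList).flatten

-- last two elements of a list (= xs[-2:] for len ≥ 2, xs otherwise)
def lastTwo (xs : List String) : List String := xs.drop (xs.length - 2)

-- characters A's loop appends while consuming the remaining definitions, given
-- whether the staging currently ends with a blank margin
def tailA : Bool → List String → List Char
  | _, [] => []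
  | b, s :: rest =>
      (if mlB s && !b then ['\n'] else []) ++ s.toList ++ ['\n'] ++
        (if mlB s then ['\n'] else []) ++ tailA (mlB s) rest

-- canonical separator-join of the definitions after the first, given the
-- previous definition's multiline flag
def canon : Bool → List String → List Char
  | _, [] => []
  | b, t :: r => (if b || mlB t then ['\n', '\n'] else ['\n']) ++ t.toList ++ canon (mlB t) r

-- A's trailing margin: '\n' plus a blank line iff the last definition is multiline
def endNL : Bool → List String → List Char
  | m, [] => '\n' :: (if m then ['\n'] else [])
  | _, t :: r => endNL (mlB t) r

theorem joinChars_append (xs ys : List String) :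
    joinChars (xs ++ ys) = joinChars xs ++ joinChars ys := by
  simp [joinChars]

theorem join_empty_toList (parts : List String) :
    (PySem.Str.join "" parts).toList = joinChars parts := by
  rw [PySem.Str.toList_join]
  show PySem.Chars.join ("".toList) _ = _
  have h : ∀ l : List String, PySem.Chars.join [] (l.map String.toList) = joinChars l := by
    intro l
    induction l with
    | nil => simp [joinChars, PySem.Chars.join_nil]
    | cons a t ih =>
      cases t with
      | nil => simp [joinChars, PySem.Chars.join_singleton]
      | cons b r =>
        simp only [List.map_cons] at *
        rw [PySem.Chars.join_cons_cons]
        simp [joinChars] at *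
        simp [ih]
  simpa using h parts

theorem lastTwo_append2 (xs : List String) (a b : String) :
    lastTwo (xs ++ [a, b]) = [a, b] := by
  have : (xs ++ [a, b]).length - 2 = xs.length := by simp
  simp only [lastTwo, this]
  exact List.drop_left

theorem lastTwo_append3 (xs : List String) (a b c : String) :
    lastTwo (xs ++ [a, b, c]) = [b, c] := by
  have : xs ++ [a, b, c] = (xs ++ [a]) ++ [b, c] := by simp
  rw [this, lastTwo_append2]

theorem lastTwo_append4 (xs : List String) (a b c d : String) :
    lastTwo (xs ++ [a, b, c, d]) = [c, d] := by
  have : xs ++ [a, b, c, d] = (xs ++ [a, b]) ++ [c, d] := by simp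
  rw [this, lastTwo_append2]

theorem blank_iff_lastTwo (staging : List String) :
    (PySem.List.slice staging (some (-2)) none == ["\n", "\n"]) =
      (lastTwo staging == ["\n", "\n"]) := by
  rw [PySem.List.slice_from_neg_ofNat staging 2 (by omega)]; rfl

theorem ml_newline : mlB "\n" = true := by decide

-- A's fold, simulated on the joined characters
theorem simA (rest : List String) : ∀ staging : List String,
    joinChars (rest.foldl joinA_step staging) =
      joinChars staging ++ tailA (lastTwo staging == ["\n", "\n"]) rest := by
  induction rest with
  | nil => intro staging; simp [tailA]
  | cons s r ih =>
    intro staging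
    rw [List.foldl_cons, ih]
    by_cases hm : mlB s = true
    · have hmc : PySem.Chars.isIn ['\n'] s.toList = true := by
        simpa [mlB, PySem.Str.isIn] using hm
      by_cases hb : (lastTwo staging == ["\n", "\n"]) = true
      · have hb' : lastTwo staging = ["\n", "\n"] := by simpa using hb
        have e : joinA_step staging s = staging ++ [s, "\n", "\n"] := by
          simp [joinA_step, blank_iff_lastTwo, hmc, hb']
        rw [e, lastTwo_append3, joinChars_append]
        simp [tailA, hm, hb, joinChars]
      · have hb' : ¬ lastTwo staging = ["\n", "\n"] := by simpa using hb
        have e : joinA_step staging s = staging ++ ["\n", s, "\n", "\n"] := by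
          simp [joinA_step, blank_iff_lastTwo, hmc, hb']
        rw [e, lastTwo_append4, joinChars_append]
        simp [tailA, hm, hb, joinChars]
    · have hm' : mlB s = false := by simpa using hm
      have hmc : PySem.Chars.isIn ['\n'] s.toList = false := by
        simpa [mlB, PySem.Str.isIn] using hm'
      have hne : s ≠ "\n" := by
        intro h; rw [h] at hm'; simp [ml_newline] at hm'
      have e : joinA_step staging s = staging ++ [s, "\n"] := by
        simp [joinA_step, hmc]
      rw [e, lastTwo_append2, joinChars_append]
      have hf : (([s, "\n"] : List String) == ["\n", "\n"]) = false := by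
        simp [hne]
      rw [hf]
      simp [tailA, hm', joinChars]

-- peeling tailA into B's canonical join plus outer margins
theorem tailA_eq_canon (rest : List String) : ∀ (b : Bool) (s : String),
    tailA b (s :: rest) =
      (if mlB s && !b then ['\n'] else []) ++ (s.toList ++ canon (mlB s) rest) ++ endNL (mlB s) rest := by
  induction rest with
  | nil => intro b s; simp [tailA, canon, endNL]
  | cons t r ih =>
    intro b s
    show (if mlB s && !b then ['\n'] else []) ++ s.toList ++ ['\n'] ++
        (if mlB s then ['\n'] else []) ++ tailA (mlB s) (t :: r) = _
    rw [ih (mlB s) t]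
    have hsep : (['\n'] : List Char) ++ (if mlB s then ['\n'] else []) ++ (if mlB t && !(mlB s) then ['\n'] else [])
        = (if mlB s || mlB t then ['\n', '\n'] else ['\n']) := by
      cases hs : mlB s <;> cases ht : mlB t <;> simp
    calc (if mlB s && !b then ['\n'] else []) ++ s.toList ++ ['\n'] ++
            (if mlB s then ['\n'] else []) ++
            ((if mlB t && !(mlB s) then ['\n'] else []) ++ (t.toList ++ canon (mlB t) r) ++ endNL (mlB t) r)
        = (if mlB s && !b then ['\n'] else []) ++ s.toList ++
            (['\n'] ++ (if mlB s then ['\n'] else []) ++ (if mlB t && !(mlB s) then ['\n'] else [])) ++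
            (t.toList ++ canon (mlB t) r) ++ endNL (mlB t) r := by simp
      _ = _ := by
            rw [hsep]
            simp [canon, endNL]

-- B's fold, simulated on the joined characters
theorem simB (rest : List String) : ∀ (b : Bool) (acc : List String),
    joinChars (((((b :: rest.map mlB).zip (rest.map mlB)).zip rest)).foldl joinB_step acc) =
      joinChars acc ++ canon b rest := by
  induction rest with
  | nil => intro b acc; simp [canon]
  | cons t r ih =>
    intro b acc
    simp only [List.map_cons, List.zip_cons_cons, List.foldl_cons]
    rw [ih (mlB t)]
    simp only [joinB_step, canon]
    rw [joinChars_append, joinChars_append]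
    split_ifs with h <;> simp [joinChars]

theorem all_space_endNL (l : List String) : ∀ m : Bool, (endNL m l).all PySem.Chars.isspace = true := by
  induction l with
  | nil => intro m; cases m <;> decide
  | cons t r ih => intro m; exact ih (mlB t)

theorem strip_ws_left (pre Y : List Char) (h : pre.all PySem.Chars.isspace = true) :
    PySem.Chars.strip (pre ++ Y) = PySem.Chars.strip Y := by
  have hd : List.dropWhile PySem.Chars.isspace pre = [] := by
    rw [List.dropWhile_eq_nil_iff]
    intro x hx; exact List.all_eq_true.mp h x hx
  simp [PySem.Chars.strip, PySem.Chars.lstrip, List.dropWhile_append, hd]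

theorem strip_ws_right (Y ws : List Char) (h : ws.all PySem.Chars.isspace = true) :
    PySem.Chars.strip (Y ++ ws) = PySem.Chars.strip Y := by
  have hd : List.dropWhile PySem.Chars.isspace ws = [] := by
    rw [List.dropWhile_eq_nil_iff]
    intro x hx; exact List.all_eq_true.mp h x hx
  simp only [PySem.Chars.strip, PySem.Chars.lstrip, List.dropWhile_append, hd]
  split_ifs with he
  · -- Y is entirely whitespace: both sides strip to []
    simp only [List.isEmpty_iff] at he
    simp [PySem.Chars.rstrip, he]
  · -- lstrip (Y ++ ws) = lstrip Y ++ ws; the right strip eats ws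
    simp only [PySem.Chars.rstrip, List.reverse_append]
    have hd' : List.dropWhile PySem.Chars.isspace ws.reverse = [] := by
      rw [List.dropWhile_eq_nil_iff]
      intro x hx
      exact List.all_eq_true.mp h x (List.mem_reverse.mp hx)
    simp [List.dropWhile_append, hd']

theorem chars_A (defs : List String) :
    (join_definitions defs).toList = PySem.Chars.strip (tailA false defs) := by
  simp only [join_definitions, PySem.Str.toList_strip, join_empty_toList]
  rw [simA defs []]
  rfl

theorem chars_B (s : String) (rest : List String) :
    (join_definitions_alt (s :: rest)).toList =
      PySem.Chars.strip (s.toList ++ canon (mlB s) rest) := by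
  simp only [join_definitions_alt, PySem.Str.toList_strip, join_empty_toList]
  have : ((s :: rest).map fun t => PySem.Str.isIn "\n" t) = mlB s :: rest.map mlB := by
    simp [mlB]
  rw [this]
  simp only [List.drop_succ_cons, List.drop_zero, List.take_succ_cons, List.take_zero]
  rw [simB rest (mlB s) [s]]
  simp [joinChars]

-- ===== VERDICT (by name: the statement is the Claim_ definition above) =====
theorem join_definitions_spec : Claim_equal_join_definitions := by
  intro defs _
  show join_definitions defs = join_definitions_alt defs
  cases defs with
  | nil =>
    decide
  | cons s rest =>
    apply String.toList_injective
    rw [chars_A, chars_B]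
    rw [tailA_eq_canon rest false s]
    rw [strip_ws_right _ _ (all_space_endNL rest (mlB s))]
    apply strip_ws_left
    split_ifs <;> decide
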